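-- pv_equiv track=rewrite | github.com/Laidwin/Kings_League_France_Predictions | kings_league/exhaustive.py | simulate_exhaustive
-- ===== SOURCE A (Python) =====
-- from itertools import islice, product
--
-- MATCH_OUTCOMES: list[tuple[int, int]] = [(3, 0), (0, 3)]
--
-- def simulate_exhaustive(
--     standings: dict[str, int],
--     remaining_matches: list[tuple[str, str]],
-- ) -> tuple[dict[str, list[int]], int]:
--     """Énumère tous les scénarios possibles et calcule les classements."""
--     teams = list(standings.keys())
--     nb_teams = len(teams)
--     nb_matches = len(remaining_matches)
--     total_scenarios = len(MATCH_OUTCOMES) ** nb_matches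
--
--     position_counter: dict[str, list[int]] = {t: [0] * nb_teams for t in teams}
--
--     for outcome_set in product(MATCH_OUTCOMES, repeat=nb_matches):
--         points = standings.copy()
--         for (home, away), (pts_h, pts_a) in zip(remaining_matches, outcome_set, strict=True):
--             points[home] += pts_h
--             points[away] += pts_a
--
--         sorted_teams = sorted(points.items(), key=lambda x: (-x[1], x[0]))
--         for pos, (team, _) in enumerate(sorted_teams):
--             position_counter[team][pos] += 1
--
--     return position_counter, total_scenarios
-- ===== SOURCE B (Python) =====
-- MATCH_OUTCOMES: list[tuple[int, int]] = [(3, 0), (0, 3)]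
--
-- def simulate_exhaustive(
--     standings: dict[str, int],
--     remaining_matches: list[tuple[str, str]],
-- ) -> tuple[dict[str, list[int]], int]:
--     """DFS with backtracking over remaining matches: one points dict is
--     updated and undone along the tree instead of copying it per scenario."""
--     teams = list(standings)
--     nb_teams = len(teams)
--     position_counter: dict[str, list[int]] = {t: [0] * nb_teams for t in teams}
--     points = dict(standings)
--
--     def dfs(i: int) -> None:
--         if i == len(remaining_matches):
--             ranked = sorted(points.items(), key=lambda x: (-x[1], x[0]))
--             for pos, (team, _) in enumerate(ranked):
--                 position_counter[team][pos] += 1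
--             return
--         home, away = remaining_matches[i]
--         for pts_h, pts_a in MATCH_OUTCOMES:
--             points[home] += pts_h
--             points[away] += pts_a
--             dfs(i + 1)
--             points[home] -= pts_h
--             points[away] -= pts_a
--
--     dfs(0)
--     return position_counter, len(MATCH_OUTCOMES) ** len(remaining_matches)
-- ===== Notes on version B (the rewrite author's own statement) =====
-- stated objective: alternative
-- what changed: B replaces the itertools.product enumeration that copies the standings dict for every scenario by a recursive DFS over the remaining matches that threads one mutable points dict, adding each outcome's points before recursing and subtracting them back afterwards (backtracking), so per-scenario work is the sort plus O(1) updates instead of a full dict copy.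
import Mathlib
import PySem

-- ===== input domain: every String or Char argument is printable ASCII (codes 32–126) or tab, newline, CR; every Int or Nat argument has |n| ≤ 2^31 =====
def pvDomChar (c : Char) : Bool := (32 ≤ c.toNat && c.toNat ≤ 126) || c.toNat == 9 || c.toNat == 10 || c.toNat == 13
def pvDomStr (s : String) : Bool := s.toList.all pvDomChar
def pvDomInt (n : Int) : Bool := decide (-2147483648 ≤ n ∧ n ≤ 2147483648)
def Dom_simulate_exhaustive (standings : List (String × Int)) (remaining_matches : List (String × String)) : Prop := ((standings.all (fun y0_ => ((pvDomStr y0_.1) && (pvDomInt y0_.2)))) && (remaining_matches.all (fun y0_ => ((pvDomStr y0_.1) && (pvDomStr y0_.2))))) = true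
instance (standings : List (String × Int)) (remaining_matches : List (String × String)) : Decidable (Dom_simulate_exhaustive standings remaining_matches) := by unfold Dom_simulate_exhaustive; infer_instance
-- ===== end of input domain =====

-- B replaces the itertools.product enumeration (fresh dict copy per scenario) by a
-- recursive DFS over the remaining matches that threads one points dict with
-- add/undo backtracking; same sort key and counts (alternative decomposition).


-- ===== PORT A =====
-- product(MATCH_OUTCOMES, repeat=n): first factor varies slowest
def prodRepA : Nat → List (List (Int × Int))
  | 0 => [[]]
  | n + 1 => ([((3 : Int), (0 : Int)), ((0 : Int), (3 : Int))]).flatMap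
      (fun o => (prodRepA n).map (o :: ·))

-- the inner 'for (home, away), (pts_h, pts_a) in zip(...)' loop (points[home] += pts_h; points[away] += pts_a)
def pointsAfterA (points0 : PySem.Dict String Int) (pairs : List ((String × String) × (Int × Int))) : PySem.Dict String Int :=
  pairs.foldl (fun p mo => (p.modify mo.1.1 0 (· + mo.2.1)).modify mo.1.2 0 (· + mo.2.2)) points0

-- sort points.items() by (-points, name) and count each team's position
def tallyA (points : PySem.Dict String Int) (c : PySem.Dict String (List Int)) : PySem.Dict String (List Int) :=
  let sorted_teams := PySem.List.sorted2 points.items (fun x => -x.2) (fun x => x.1)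
  (PySem.List.enumerate sorted_teams 0).foldl
    (fun c2 pe => c2.modify pe.2.1 [] (fun l => PySem.List.pySetD l pe.1 (PySem.List.pyGetD l pe.1 0 + 1))) c

def simulate_exhaustive (standings : List (String × Int)) (remaining_matches : List (String × String)) : (List (String × List Int)) × Int :=
  let points0 := PySem.Dict.ofList standings
  let teams := points0.keys
  let nb_teams := teams.length
  let nb_matches := remaining_matches.length
  let total_scenarios : Int := 2 ^ nb_matches
  let counter0 : PySem.Dict String (List Int) :=
    teams.foldl (fun c t => c.insert t (List.replicate nb_teams (0 : Int))) PySem.Dict.empty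
  let counter := (prodRepA nb_matches).foldl
    (fun c os => tallyA (pointsAfterA points0 (remaining_matches.zip os)) c) counter0
  (counter.items, total_scenarios)

-- ===== PORT B =====
-- leaf of the DFS: sort the current points and count positions
def leafB (points : PySem.Dict String Int) (c : PySem.Dict String (List Int)) : PySem.Dict String (List Int) :=
  let ranked := PySem.List.sorted2 points.items (fun x => -x.2) (fun x => x.1)
  (PySem.List.enumerate ranked 0).foldl
    (fun c2 pe => c2.modify pe.2.1 [] (fun l => PySem.List.pySetD l pe.1 (PySem.List.pyGetD l pe.1 0 + 1))) c

-- DFS over the remaining matches; 'for (pts_h, pts_a) in MATCH_OUTCOMES' unrolled over the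
-- two literal outcomes; Python's subtract-back undo is reusing the unmodified `points`
def dfsB : List (String × String) → PySem.Dict String Int → PySem.Dict String (List Int) → PySem.Dict String (List Int)
  | [], points, counter => leafB points counter
  | (home, away) :: rest, points, counter =>
      let c1 := dfsB rest ((points.modify home 0 (· + 3)).modify away 0 (· + 0)) counter
      dfsB rest ((points.modify home 0 (· + 0)).modify away 0 (· + 3)) c1

def simulate_exhaustive_alt (standings : List (String × Int)) (remaining_matches : List (String × String)) : (List (String × List Int)) × Int :=
  let points0 := PySem.Dict.ofList standings
  let teams := points0.keys
  let counter0 : PySem.Dict String (List Int) :=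
    teams.foldl (fun c t => c.insert t (List.replicate teams.length (0 : Int))) PySem.Dict.empty
  ((dfsB remaining_matches points0 counter0).items, 2 ^ remaining_matches.length)

-- ===== PRECONDITION & SPEC =====
-- A raises KeyError when a team of remaining_matches is not a key of standings; Pre_ requires all match teams present.
def Pre_simulate_exhaustive (standings : List (String × Int)) (remaining_matches : List (String × String)) : Prop :=
  ∀ m ∈ remaining_matches, m.1 ∈ standings.map Prod.fst ∧ m.2 ∈ standings.map Prod.fst
instance (standings : List (String × Int)) (remaining_matches : List (String × String)) : Decidable (Pre_simulate_exhaustive standings remaining_matches) := by unfold Pre_simulate_exhaustive; infer_instance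

def pvWitness_simulate_exhaustive : (List (String × Int)) × (List (String × String)) :=
  ([("A", 3), ("B", 0)], [("A", "B"), ("B", "A")])

def Spec_simulate_exhaustive (standings : List (String × Int)) (remaining_matches : List (String × String)) (out : (List (String × List Int)) × Int) : Prop := out = simulate_exhaustive_alt standings remaining_matches
instance (standings : List (String × Int)) (remaining_matches : List (String × String)) (out : (List (String × List Int)) × Int) : Decidable (Spec_simulate_exhaustive standings remaining_matches out) := by unfold Spec_simulate_exhaustive; infer_instance

-- ===== CLAIM (what is proved, stated in full; the proofs are below) =====
def Claim_equal_simulate_exhaustive : Prop := ∀ (standings : List (String × Int)) (remaining_matches : List (String × String)), Dom_simulate_exhaustive standings remaining_matches → Pre_simulate_exhaustive standings remaining_matches → Spec_simulate_exhaustive standings remaining_matches (simulate_exhaustive standings remaining_matches)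

-- ===== LEMMAS AND PROOFS =====

-- the DFS equals A's fold over the product of outcome lists, for any start dicts
lemma dfsB_eq_foldl (ms : List (String × String)) (pts : PySem.Dict String Int) (ctr : PySem.Dict String (List Int)) :
    dfsB ms pts ctr = (prodRepA ms.length).foldl
      (fun c os => tallyA (pointsAfterA pts (ms.zip os)) c) ctr := by
  induction ms generalizing pts ctr with
  | nil => rfl
  | cons m rest ih =>
    obtain ⟨home, away⟩ := m
    simp only [dfsB, List.length_cons, prodRepA, List.flatMap_cons, List.flatMap_nil,
      List.append_nil, List.foldl_append, List.foldl_map]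
    rw [ih, ih]
    rfl

theorem simulate_exhaustive_spec : Claim_equal_simulate_exhaustive := by
  intro standings remaining_matches _ _
  show _ = _
  simp only [simulate_exhaustive, simulate_exhaustive_alt, dfsB_eq_foldl]
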